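-- pv_equiv track=rewrite | github.com/tomkalervo/aoc2023 | src/day04.py | _listOps2
-- ===== SOURCE A (Python) =====
-- def _listOps2(cards):
--   sum = 0
--   copiesNext = [1]
--   copiesUsed = []
--   while(len(cards) > 0):
--     [_, winners, numbers] = cards.pop(0)
--     if (len(copiesNext) == 0):
--       copiesNext = [1]
--
--     copies = copiesNext.pop(0)
--     copiesUsed.append(copies)
--     wins = 0
--     for x in numbers:
--       if x in winners:
--         wins += 1
--     for x in range(0, wins):
--       if len(copiesNext) <= x:
--         copiesNext.append(1)
--
--       copiesNext[x] += copies
--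
--   for x in copiesUsed:
--     sum += x
--
--   return sum
-- ===== SOURCE B (Python) =====
-- def _listOps2(cards):
--   n = len(cards)
--   counts = [1] * n
--   total = 0
--   i = 0
--   while cards:
--     _, winners, numbers = cards.pop(0)
--     wins = sum(x in winners for x in numbers)
--     for j in range(i + 1, min(i + 1 + wins, n)):
--       counts[j] += counts[i]
--     total += counts[i]
--     i += 1
--   return total
-- ===== Notes on version B (the rewrite author's own statement) =====
-- stated objective: simpler
-- what changed: Replaces A's front-popped relative-offset queue of pending copies (with conditional re-seeding, dynamic append-and-extend, and a separate final pass summing a copiesUsed list) by a single absolute count table counts=[1]*n updated at forward indices i+1..min(i+1+wins,n)-1 and a running total accumulated in the same pass.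
import Mathlib
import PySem

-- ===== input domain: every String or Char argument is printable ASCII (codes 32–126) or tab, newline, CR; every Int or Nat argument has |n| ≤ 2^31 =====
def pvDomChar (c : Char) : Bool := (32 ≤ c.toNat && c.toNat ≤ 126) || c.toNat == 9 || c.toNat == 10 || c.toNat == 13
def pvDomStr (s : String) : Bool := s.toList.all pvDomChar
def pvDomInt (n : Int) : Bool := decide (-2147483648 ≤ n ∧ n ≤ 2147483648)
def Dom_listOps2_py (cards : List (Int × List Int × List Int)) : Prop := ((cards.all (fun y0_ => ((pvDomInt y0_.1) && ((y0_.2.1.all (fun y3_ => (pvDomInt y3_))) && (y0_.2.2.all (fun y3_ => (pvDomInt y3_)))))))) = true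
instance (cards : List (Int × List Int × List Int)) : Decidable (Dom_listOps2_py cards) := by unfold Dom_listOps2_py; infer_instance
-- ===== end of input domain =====

-- B replaces A's front-popped relative queue of pending copies (and its second summing pass)
-- by one absolute indexed count table and a running total; the equivalence proved is about the
-- RETURN value (A empties its argument by pop(0); the Python B performs the same mutation).

-- ===== PORT A =====
-- wins counter: for x in numbers: if x in winners: wins += 1
def pyAWins (winners : List Int) (numbers : List Int) : Nat :=
  numbers.foldl (fun wins x => if winners.contains x then wins + 1 else wins) 0

-- one iteration of 'for x in range(0, wins)': extend copiesNext with 1 if needed, then copiesNext[x] += copies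
def pyABump (copies : Int) (cn : List Int) (x : Nat) : List Int :=
  let cn' := if cn.length ≤ x then cn ++ [1] else cn
  cn'.set x (cn'.getD x 0 + copies)

def pyAInner (cn : List Int) (copies : Int) (wins : Nat) : List Int :=
  (List.range wins).foldl (pyABump copies) cn

-- the while-loop: state = (remaining cards, copiesNext, copiesUsed)
def pyALoop : List (Int × List Int × List Int) → List Int → List Int → List Int
  | [], _copiesNext, used => used
  | (c :: rest), copiesNext, used =>
    let cn0 := if copiesNext.length == 0 then [1] else copiesNext
    let copies := cn0.getD 0 0          -- copiesNext.pop(0); cn0 is never empty, so the default is never used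
    let wins := pyAWins c.2.1 c.2.2
    pyALoop rest (pyAInner cn0.tail copies wins) (used ++ [copies])

def listOps2_py (cards : List (Int × List Int × List Int)) : Int :=
  (pyALoop cards [1] []).foldl (· + ·) 0

-- ===== PORT B =====
-- wins = sum(x in winners for x in numbers)
def pyBWins (winners : List Int) (numbers : List Int) : Nat :=
  numbers.countP (fun x => winners.contains x)

-- one iteration of 'for j in range(i+1, min(i+1+wins, n)): counts[j] += counts[i]'
def pyBAdd (ci : Int) (counts : List Int) (j : Nat) : List Int :=
  counts.set j (counts.getD j 0 + ci)

-- the while-loop: state = (remaining cards, i, counts, total); range(i+1, min(i+1+wins, n))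
-- has min wins (n-(i+1)) elements starting at i+1
def pyBLoop (n : Nat) : List (Int × List Int × List Int) → Nat → List Int → Int → Int
  | [], _, _, total => total
  | (c :: rest), i, counts, total =>
    let ci := counts.getD i 0
    let wins := pyBWins c.2.1 c.2.2
    let counts' := (List.range' (i + 1) (min wins (n - (i + 1)))).foldl (pyBAdd ci) counts
    pyBLoop n rest (i + 1) counts' (total + ci)

def listOps2_py_alt (cards : List (Int × List Int × List Int)) : Int :=
  pyBLoop cards.length cards 0 (List.replicate cards.length 1) 0

-- ===== PRECONDITION & SPEC =====
def Spec_listOps2_py (cards : List (Int × List Int × List Int)) (out : Int) : Prop := out = listOps2_py_alt cards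
instance (cards : List (Int × List Int × List Int)) (out : Int) : Decidable (Spec_listOps2_py cards out) := by unfold Spec_listOps2_py; infer_instance

-- ===== CLAIM (what is proved, stated in full; the proofs are below) =====
def Claim_equal_listOps2_py : Prop := ∀ (cards : List (Int × List Int × List Int)), Dom_listOps2_py cards → Spec_listOps2_py cards (listOps2_py cards)

-- ===== LEMMAS AND PROOFS =====

-- view of A's copiesNext queue: entry k if present, else the implicit base copy 1
def padGet (l : List Int) (k : Nat) : Int := if k < l.length then l.getD k 0 else 1

theorem wins_aux (w : List Int) (nums : List Int) : ∀ (a : Nat),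
    nums.foldl (fun wins x => if w.contains x then wins + 1 else wins) a
      = a + nums.countP (fun x => w.contains x) := by
  induction nums with
  | nil => intro a; simp
  | cons x xs ih =>
      intro a
      simp only [List.foldl_cons, List.countP_cons]
      rw [ih]
      by_cases h : x ∈ w <;> simp [h] <;> omega

theorem wins_eq (w nums : List Int) : pyAWins w nums = pyBWins w nums := by
  unfold pyAWins pyBWins
  rw [wins_aux]
  simp

theorem getD_set_eq (l : List Int) (j k : Nat) (v : Int) :
    (l.set j v).getD k 0 = if k = j ∧ j < l.length then v else l.getD k 0 := by
  simp only [List.getD, List.getElem?_set]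
  by_cases h1 : j = k
  · subst h1
    by_cases h2 : j < l.length <;> simp [h2]
  · have h3 : ¬(k = j ∧ j < l.length) := fun hh => h1 hh.1.symm
    simp [h1, h3]

theorem length_bump (c : Int) (l : List Int) (x : Nat) (h : x ≤ l.length) :
    (pyABump c l x).length = max l.length (x + 1) := by
  unfold pyABump
  split_ifs with h1 <;> simp <;> omega

theorem padGet_bump (c : Int) (l : List Int) (x : Nat) (h : x ≤ l.length) (k : Nat) :
    padGet (pyABump c l x) k = padGet l k + if k = x then c else 0 := by
  unfold pyABump padGet
  by_cases hx : l.length ≤ x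
  · have hxe : x = l.length := le_antisymm h hx
    subst hxe
    simp only [if_pos hx, getD_set_eq, List.length_set, List.length_append,
      List.length_cons, List.length_nil]
    have ha : (l ++ [1]).getD l.length 0 = 1 := by
      simp [List.getD]
    by_cases hk : k = l.length
    · subst hk
      simp
    · by_cases hk2 : k < l.length
      · simp [hk, hk2, Nat.lt_succ_of_lt hk2]
      · have hc : ¬ k < l.length + 1 := by omega
        simp [hk, hk2, hc]
  · replace hx : x < l.length := by omega
    simp only [if_neg (by omega : ¬ l.length ≤ x), getD_set_eq, List.length_set]
    by_cases hk : k = x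
    · subst hk
      simp [hx]
    · simp [hk]

theorem pyAInner_succ (cn : List Int) (c : Int) (w : Nat) :
    pyAInner cn c (w + 1) = pyABump c (pyAInner cn c w) w := by
  unfold pyAInner
  rw [List.range_succ, List.foldl_append]
  rfl

theorem length_inner (cn : List Int) (c : Int) (w : Nat) :
    (pyAInner cn c w).length = max cn.length w := by
  induction w with
  | zero => simp [pyAInner]
  | succ w ih =>
      rw [pyAInner_succ, length_bump c _ w (by rw [ih]; omega), ih]
      omega

theorem padGet_inner (cn : List Int) (c : Int) (w : Nat) (k : Nat) :
    padGet (pyAInner cn c w) k = padGet cn k + if k < w then c else 0 := by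
  induction w with
  | zero => simp [pyAInner]
  | succ w ih =>
      rw [pyAInner_succ, padGet_bump c _ w (by rw [length_inner]; omega) k, ih]
      by_cases h1 : k = w <;> by_cases h2 : k < w <;> simp [h1, h2] <;> omega
  
theorem padGet_head (cn : List Int) :
    (if cn.length == 0 then [1] else cn).getD 0 0 = padGet cn 0 := by
  cases cn <;> simp [padGet]

theorem padGet_shift (cn : List Int) (k : Nat) :
    padGet (if cn.length == 0 then [1] else cn).tail k = padGet cn (k + 1) := by
  cases cn with
  | nil => simp [padGet]
  | cons a t =>
      simp only [padGet, List.length_cons]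
      have h0 : (t.length + 1 == 0) = false := by simp
      simp only [h0, Bool.false_eq_true, if_false, List.tail_cons, List.getD_cons_succ]
      split_ifs <;> first | rfl | omega

theorem padGet_one (k : Nat) : padGet [1] k = 1 := by
  cases k <;> simp [padGet]

theorem length_addFold (ci : Int) (m s : Nat) (counts : List Int) :
    ((List.range' s m).foldl (pyBAdd ci) counts).length = counts.length := by
  induction m generalizing s counts with
  | zero => rfl
  | succ m ih =>
      rw [List.range'_succ, List.foldl_cons, ih]
      simp [pyBAdd]

theorem getD_addFold (ci : Int) (m s : Nat) (counts : List Int)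
    (hb : s + m ≤ counts.length) (j : Nat) :
    ((List.range' s m).foldl (pyBAdd ci) counts).getD j 0 =
      counts.getD j 0 + if s ≤ j ∧ j < s + m then ci else 0 := by
  induction m generalizing s counts with
  | zero =>
      have h0 : ¬(s ≤ j ∧ j < s + 0) := by omega
      simp [List.range']
  | succ m ih =>
      rw [List.range'_succ, List.foldl_cons,
        ih (s + 1) _ (by simp only [pyBAdd, List.length_set]; omega)]
      unfold pyBAdd
      rw [getD_set_eq]
      by_cases h1 : j = s
      · subst h1
        have hlt : j < counts.length := by omega
        have h3 : j ≤ j ∧ j < j + (m + 1) := by omega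
        simp [hlt, h3]
      · have hne : ¬(j = s ∧ s < counts.length) := fun hh => h1 hh.1
        simp only [if_neg hne]
        have h5 : (s < j ∧ j < s + 1 + m) ↔ (s ≤ j ∧ j < s + (m + 1)) := by omega
        simp [h5]

theorem main_loop (n : Nat) (rest : List (Int × List Int × List Int)) (i : Nat)
    (counts cn used : List Int) (total : Int)
    (hn : n = i + rest.length) (hlen : counts.length = n)
    (hinv : ∀ k, k < rest.length → counts.getD (i + k) 0 = padGet cn k)
    (ht : total = used.foldl (· + ·) 0) :
    pyBLoop n rest i counts total = (pyALoop rest cn used).foldl (· + ·) 0 := by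
  induction rest generalizing i counts cn used total with
  | nil => simpa [pyBLoop, pyALoop] using ht
  | cons c rest ih =>
      simp only [pyBLoop, pyALoop]
      have hn' : n = i + (rest.length + 1) := by simpa using hn
      have hm : n - (i + 1) = rest.length := by omega
      have hw : pyBWins c.2.1 c.2.2 = pyAWins c.2.1 c.2.2 := (wins_eq _ _).symm
      have hci : counts.getD i 0 = (if cn.length == 0 then [1] else cn).getD 0 0 := by
        rw [padGet_head]
        simpa using hinv 0 (by simp)
      rw [hm, hw]
      refine ih (i + 1) _ _ _ _ (by omega) (by rw [length_addFold]; exact hlen) ?_ ?_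
      · intro k hk
        rw [getD_addFold _ _ _ _ (by rw [hlen]; omega) _, padGet_inner, padGet_shift,
          padGet_head]
        have e1 : counts.getD (i + 1 + k) 0 = padGet cn (k + 1) := by
          rw [show i + 1 + k = i + (k + 1) from by omega]
          exact hinv (k + 1) (by simp only [List.length_cons]; omega)
        have e2 : counts.getD i 0 = padGet cn 0 := by simpa using hinv 0 (by simp)
        have hiff : (i + 1 ≤ i + 1 + k ∧
            i + 1 + k < i + 1 + min (pyAWins c.2.1 c.2.2) rest.length)
            ↔ k < pyAWins c.2.1 c.2.2 := by omega
        rw [e1, e2]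
        simp only [hiff]
      · rw [List.foldl_append, ht, hci]
        simp

-- ===== VERDICT (by name: the statement is the Claim_ definition above) =====
theorem listOps2_py_spec : Claim_equal_listOps2_py := by
  intro cards _
  unfold Spec_listOps2_py listOps2_py listOps2_py_alt
  refine (main_loop cards.length cards 0 (List.replicate cards.length 1) [1] [] 0
    (by simp) (by simp) ?_ rfl).symm
  intro k hk
  rw [padGet_one]
  simp [List.getD, hk]
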